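-- pv_equiv track=rewrite | github.com/0kilo/geometrix | src/geometrix/symbolic/llm_validate.py | _infer_symbols
-- ===== SOURCE A (Python) =====
-- def _infer_symbols(expr: str) -> list[str]:
--     symbols: list[str] = []
--     token = ""
--     for char in expr:
--         if char.isalpha():
--             token += char
--         else:
--             if token:
--                 symbols.append(token)
--                 token = ""
--     if token:
--         symbols.append(token)
--     return sorted(set(symbols))
-- ===== SOURCE B (Python) =====
-- def _infer_symbols(expr: str) -> list[str]:
--     tokens = []
--     i, n = 0, len(expr)
--     while i < n:
--         if expr[i].isalpha():
--             j = i + 1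
--             while j < n and expr[j].isalpha():
--                 j += 1
--             tokens.append(expr[i:j])
--             i = j
--         else:
--             i += 1
--     return sorted(set(tokens))
-- ===== Notes on version B (the rewrite author's own statement) =====
-- stated objective: alternative
-- what changed: Replaced the char-by-char accumulator/flush state machine with a run-scanning loop that finds each maximal alphabetic run by index and slices it out in one step.
import Mathlib
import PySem

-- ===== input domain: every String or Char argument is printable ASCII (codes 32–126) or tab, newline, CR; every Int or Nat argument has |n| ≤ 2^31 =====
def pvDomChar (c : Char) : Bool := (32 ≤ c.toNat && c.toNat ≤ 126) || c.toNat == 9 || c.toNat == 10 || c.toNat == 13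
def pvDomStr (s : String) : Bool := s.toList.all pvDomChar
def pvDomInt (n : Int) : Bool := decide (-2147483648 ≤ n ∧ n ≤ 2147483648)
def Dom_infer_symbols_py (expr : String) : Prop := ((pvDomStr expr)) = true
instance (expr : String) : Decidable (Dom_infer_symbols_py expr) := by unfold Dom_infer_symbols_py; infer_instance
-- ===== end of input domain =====

-- B replaces A's char-by-char accumulator/flush state machine with a run-scanning
-- loop that extracts each maximal alphabetic run in one step (alternative decomposition).


-- ===== PORT A =====
-- loop state: (symbols so far, current token as List Char); stepA is one iteration of A's for-loop
def stepA (st : List String × List Char) (c : Char) : List String × List Char :=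
  if PySem.Chars.isalpha c then (st.1, st.2 ++ [c])
  else if st.2 ≠ [] then (st.1 ++ [String.ofList st.2], [])
  else st

def infer_symbols_py (expr : String) : List String :=
  let st := expr.toList.foldl stepA ([], [])
  let symbols := if st.2 ≠ [] then st.1 ++ [String.ofList st.2] else st.1
  PySem.List.sorted (PySem.Set.ofList symbols) (fun x => x) false

-- ===== PORT B =====
-- run scanner: on an alphabetic char, take the whole maximal alphabetic run at once
def groupAlpha : List Char → List String
  | [] => []
  | c :: cs =>
    if PySem.Chars.isalpha c then
      String.ofList (c :: cs.takeWhile PySem.Chars.isalpha) :: groupAlpha (cs.dropWhile PySem.Chars.isalpha)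
    else groupAlpha cs
termination_by cs => cs.length
decreasing_by
  · exact Nat.lt_succ_of_le (List.length_dropWhile_le _ _)
  · exact Nat.lt_succ_self _

def infer_symbols_py_alt (expr : String) : List String :=
  PySem.List.sorted (PySem.Set.ofList (groupAlpha expr.toList)) (fun x => x) false

-- ===== PRECONDITION & SPEC =====
def Spec_infer_symbols_py (expr : String) (out : List String) : Prop := out = infer_symbols_py_alt expr
instance (expr : String) (out : List String) : Decidable (Spec_infer_symbols_py expr out) := by unfold Spec_infer_symbols_py; infer_instance

-- ===== CLAIM (what is proved, stated in full; the proofs are below) =====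
def Claim_equal_infer_symbols_py : Prop := ∀ (expr : String), Dom_infer_symbols_py expr → Spec_infer_symbols_py expr (infer_symbols_py expr)

-- ===== LEMMAS AND PROOFS =====

-- A's loop, abstracted: continue the fold from state (syms, tok) and flush at the end.
def auxA (tok : List Char) : List Char → List String
  | [] => if tok ≠ [] then [String.ofList tok] else []
  | c :: cs =>
    if PySem.Chars.isalpha c then auxA (tok ++ [c]) cs
    else if tok ≠ [] then String.ofList tok :: auxA [] cs
    else auxA [] cs

lemma foldl_eq_auxA (cs : List Char) : ∀ (syms : List String) (tok : List Char),
    (if (cs.foldl stepA (syms, tok)).2 ≠ []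
      then (cs.foldl stepA (syms, tok)).1 ++ [String.ofList (cs.foldl stepA (syms, tok)).2]
      else (cs.foldl stepA (syms, tok)).1)
    = syms ++ auxA tok cs := by
  induction cs with
  | nil =>
    intro syms tok
    simp only [List.foldl_nil, auxA]
    by_cases h : tok = [] <;> simp [h]
  | cons c cs ih =>
    intro syms tok
    rw [List.foldl_cons]
    by_cases ha : PySem.Chars.isalpha c
    · rw [show stepA (syms, tok) c = (syms, tok ++ [c]) by simp [stepA, ha]]
      rw [ih syms (tok ++ [c])]
      simp [auxA, ha]
    · by_cases ht : tok = []
      · rw [show stepA (syms, tok) c = (syms, tok) by simp [stepA, ha, ht]]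
        subst ht
        rw [ih syms []]
        simp [auxA, ha]
      · rw [show stepA (syms, tok) c = (syms ++ [String.ofList tok], []) by simp [stepA, ha, ht]]
        rw [ih (syms ++ [String.ofList tok]) []]
        simp [auxA, ha, ht, List.append_assoc]

lemma auxA_eq_groupAlpha (cs : List Char) : ∀ (tok : List Char),
    auxA tok cs = if tok = [] then groupAlpha cs
      else String.ofList (tok ++ cs.takeWhile PySem.Chars.isalpha)
            :: groupAlpha (cs.dropWhile PySem.Chars.isalpha) := by
  induction cs with
  | nil =>
    intro tok
    simp only [auxA, groupAlpha, List.takeWhile_nil, List.dropWhile_nil]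
    by_cases h : tok = [] <;> simp [h]
  | cons c cs ih =>
    intro tok
    by_cases ha : PySem.Chars.isalpha c
    · simp only [auxA, ha, if_true, ite_true, List.takeWhile_cons, List.dropWhile_cons]
      rw [ih (tok ++ [c])]
      by_cases h : tok = []
      · subst h
        simp [groupAlpha, ha]
      · simp [h, ha]
    · simp only [auxA, ha, Bool.false_eq_true, if_false, ite_false,
        List.takeWhile_cons, List.dropWhile_cons]
      have hgc : groupAlpha (c :: cs) = groupAlpha cs := by
        simp [groupAlpha, ha]
      by_cases h : tok = []
      · subst h
        simpa [hgc] using ih []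
      · simp only [h, ite_false, if_false, ha, Bool.false_eq_true]
        rw [ih [], hgc]
        simp [h]

lemma infer_symbols_eq (expr : String) : infer_symbols_py expr = infer_symbols_py_alt expr := by
  unfold infer_symbols_py infer_symbols_py_alt
  have h := foldl_eq_auxA expr.toList [] []
  rw [auxA_eq_groupAlpha expr.toList []] at h
  simp only [List.nil_append, if_true, ite_true] at h
  simp only [h]

-- ===== VERDICT (by name: the statement is the Claim_ definition above) =====
theorem infer_symbols_py_spec : Claim_equal_infer_symbols_py := by
  intro expr _
  unfold Spec_infer_symbols_py
  exact infer_symbols_eq expr
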